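-- pv_equiv track=rewrite | github.com/LJuans0/PcProgramacion1 | May10.py | pregunta_4
-- ===== SOURCE A (Python) =====
-- def pregunta_4(palabra: str) -> int:
--     """
--     Parametros:
--         palabra (str):  Palabra que se va a verificar si es palindroma.
--     Retorna:
--         (int): Si es palindromo devuelve la cantidad de consonantes, -1 en caso contrario.
--     """
--     textasocopia=palabra.lower()
--     contadorsoteperrote=0
--     textasoinv=textasocopia[::-1]
--
--     if textasocopia==textasoinv:
--         for i in textasocopia:
--             if i not in 'aeiou ':
--                 contadorsoteperrote += 1
--         return contadorsoteperrote
--     else: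
--         return -1
-- ===== SOURCE B (Python) =====
-- def pregunta_4(palabra: str) -> int:
--     t = palabra.lower()
--     i = 0
--     j = len(t) - 1
--     while i < j:
--         if t[i] != t[j]:
--             return -1
--         i += 1
--         j -= 1
--     contador = 0
--     for c in t:
--         if c not in 'aeiou ':
--             contador += 1
--     return contador
-- ===== Notes on version B (the rewrite author's own statement) =====
-- stated objective: alternative
-- what changed: Palindrome test by a two-pointer index loop that exits on the first mismatch, instead of building the reversed string and comparing whole strings.
import Mathlib
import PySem

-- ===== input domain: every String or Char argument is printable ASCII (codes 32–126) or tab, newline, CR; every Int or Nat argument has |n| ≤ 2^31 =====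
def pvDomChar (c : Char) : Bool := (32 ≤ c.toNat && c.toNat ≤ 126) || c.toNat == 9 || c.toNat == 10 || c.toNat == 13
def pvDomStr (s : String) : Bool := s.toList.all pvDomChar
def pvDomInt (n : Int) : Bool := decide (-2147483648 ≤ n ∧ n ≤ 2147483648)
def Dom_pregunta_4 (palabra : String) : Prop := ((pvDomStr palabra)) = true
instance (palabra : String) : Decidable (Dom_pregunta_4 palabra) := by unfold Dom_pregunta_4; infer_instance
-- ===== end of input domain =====

-- B replaces A's build-the-reversed-string comparison by a two-pointer index loop
-- that exits on the first mismatch (objective: alternative decomposition).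

-- ===== PORT A =====
def pregunta_4 (palabra : String) : Int :=
  let textasocopia := PySem.Chars.lower palabra.toList
  let textasoinv := textasocopia.reverse          -- textasocopia[::-1] (PySem.slice?_none_none_neg_one)
  if textasocopia = textasoinv then
    textasocopia.foldl (fun acc i => if i ∈ "aeiou ".toList then acc else acc + 1) (0 : Int)
  else
    -1

-- ===== PORT B =====
-- the 'while i < j' two-pointer loop of Source B; t[i]/t[j] are always in range when read
def palLoop (t : List Char) (i j : Nat) : Bool :=
  if i < j then
    if t.getD i ' ' ≠ t.getD j ' ' then false
    else palLoop t (i + 1) (j - 1)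
  else true
termination_by j - i

def pregunta_4_alt (palabra : String) : Int :=
  let t := PySem.Chars.lower palabra.toList
  if palLoop t 0 (t.length - 1) then
    t.foldl (fun acc c => if c ∈ "aeiou ".toList then acc else acc + 1) (0 : Int)
  else
    -1

-- ===== PRECONDITION & SPEC =====
def Spec_pregunta_4 (palabra : String) (out : Int) : Prop := out = pregunta_4_alt palabra
instance (palabra : String) (out : Int) : Decidable (Spec_pregunta_4 palabra out) := by unfold Spec_pregunta_4; infer_instance

-- ===== CLAIM (what is proved, stated in full; the proofs are below) =====
def Claim_equal_pregunta_4 : Prop := ∀ (palabra : String), Dom_pregunta_4 palabra → Spec_pregunta_4 palabra (pregunta_4 palabra)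

-- ===== LEMMAS AND PROOFS =====

theorem palLoop_iff (t : List Char) (i j : Nat) :
    palLoop t i j = true ↔
      ∀ k, i ≤ k → k ≤ j → t.getD k ' ' = t.getD (i + j - k) ' ' := by
  fun_induction palLoop t i j with
  | case1 i j hij hne =>
      simp only [Bool.false_eq_true, false_iff, not_forall]
      exact ⟨i, le_refl i, Nat.le_of_lt hij, by simpa using hne⟩
  | case2 i j hij heq ih =>
      push Not at heq
      constructor
      · intro h k hik hkj
        rcases Nat.eq_or_lt_of_le hik with rfl | hik'
        · simpa using heq
        · rcases Nat.eq_or_lt_of_le hkj with rfl | hkj'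
          · have : i + k - k = i := by omega
            rw [this]; exact heq.symm
          · have := (ih.mp h) k (by omega) (by omega)
            have harith : i + 1 + (j - 1) - k = i + j - k := by omega
            rwa [harith] at this
      · intro h
        refine ih.mpr ?_
        intro k hik hkj
        have := h k (by omega) (by omega)
        have harith : i + 1 + (j - 1) - k = i + j - k := by omega
        rw [harith]; exact this
  | case3 i j hij =>
      simp only [true_iff]
      intro k hik hkj
      have : k = i ∧ i = j := by omega
      rcases this with ⟨rfl, rfl⟩
      have : k + k - k = k := by omega
      rw [this]

theorem palLoop_eq_reverse (t : List Char) :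
    palLoop t 0 (t.length - 1) = true ↔ t = t.reverse := by
  rw [palLoop_iff]
  rcases Nat.eq_zero_or_pos t.length with h0 | hpos
  · have : t = [] := List.length_eq_zero_iff.mp h0
    subst this
    simp
  · constructor
    · intro h
      apply List.ext_getElem (by simp)
      intro k hk hk'
      have := h k (Nat.zero_le k) (by omega)
      rw [List.getD_eq_getElem t ' ' hk, List.getD_eq_getElem t ' ' (by omega)] at this
      rw [List.getElem_reverse]
      convert this using 2
      omega
    · intro h k hik hkj
      have hk : k < t.length := by omega
      have hk2 : 0 + (t.length - 1) - k < t.length := by omega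
      rw [List.getD_eq_getElem t ' ' hk, List.getD_eq_getElem t ' ' hk2]
      rw [List.getElem_of_eq h hk, List.getElem_reverse]
      congr 1
      omega

-- ===== VERDICT (by name: the statement is the Claim_ definition above) =====
theorem pregunta_4_spec : Claim_equal_pregunta_4 := by
  intro palabra _
  unfold Spec_pregunta_4 pregunta_4 pregunta_4_alt
  dsimp only
  set t := PySem.Chars.lower palabra.toList with ht
  by_cases h : t = t.reverse
  · rw [if_pos h, if_pos ((palLoop_eq_reverse t).mpr h)]
  · have hb : ¬ (palLoop t 0 (t.length - 1) = true) :=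
      fun hb => h ((palLoop_eq_reverse t).mp hb)
    rw [if_neg h, if_neg hb]
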